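-- pv_equiv track=rewrite | github.com/rschwa6308/Project-Euler | euler491/euler491.py | possible_integers
-- ===== SOURCE A (Python) =====
-- from math import factorial
--
-- def orderings(multiset):
--     repeats = len(multiset) - len(set(multiset))
--
--     return factorial(len(multiset)) // 2**repeats
--
-- def possible_integers(positives, negatives):
--     count = 0
--
--     for head in set(positives):
--         if head == 0: continue     # no leading zeros
--         tail = list(positives)
--         tail.remove(head)
--         count += orderings(tail)
--
--     count *= orderings(negatives)
--
--     return count
-- ===== SOURCE B (Python) =====
-- from math import factorial
--
-- # Closed form: every head with multiplicity >= 2 contributes factorial(n-1) >> (n-1-distinct)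
-- # arrangements of its tail, every head occurring once contributes factorial(n-1) >> (n-distinct);
-- # no per-head loop over tails is needed.
-- def possible_integers(positives, negatives):
--     n = len(positives)
--     heads = set(positives)
--     distinct = len(heads)
--     singles = sum(1 for d in heads if d != 0 and positives.count(d) == 1)
--     multis = distinct - (0 in heads) - singles
--     count = 0
--     if multis:
--         count += multis * (factorial(n - 1) >> (n - 1 - distinct))
--     if singles:
--         count += singles * (factorial(n - 1) >> (n - distinct))
--     m = len(negatives)
--     return count * (factorial(m) >> (m - len(set(negatives))))
-- ===== Notes on version B (the rewrite author's own statement) =====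
-- stated objective: simpler
-- what changed: Replaces A's loop over distinct heads (recomputing orderings of each tail) with a closed form: count heads of multiplicity one vs at-least-two once, then combine two shifted-factorial terms; the negatives multiplier is the same formula inlined.
import Mathlib
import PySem

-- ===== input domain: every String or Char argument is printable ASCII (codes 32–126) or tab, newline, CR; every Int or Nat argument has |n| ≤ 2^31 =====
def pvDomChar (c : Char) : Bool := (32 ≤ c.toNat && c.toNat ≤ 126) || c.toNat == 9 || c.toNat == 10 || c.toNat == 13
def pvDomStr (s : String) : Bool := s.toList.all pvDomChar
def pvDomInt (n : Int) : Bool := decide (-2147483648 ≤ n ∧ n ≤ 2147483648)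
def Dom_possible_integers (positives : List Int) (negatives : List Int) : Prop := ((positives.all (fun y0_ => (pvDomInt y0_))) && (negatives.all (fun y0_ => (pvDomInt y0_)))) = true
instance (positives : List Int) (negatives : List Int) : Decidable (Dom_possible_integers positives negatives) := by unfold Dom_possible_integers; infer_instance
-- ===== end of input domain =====

-- B replaces A's per-head loop (one orderings(tail) recount per distinct head) by a closed form
-- built from two multiplicities counted once; same values everywhere (objective: simpler).

-- ===== PORT A =====
-- orderings: repeats = len(multiset) - len(set(multiset)); factorial(len) // 2**repeats
-- (both operands are nonnegative, so Python's // is Nat division)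
def orderings (multiset : List Int) : Int :=
  let repeats := multiset.length - (PySem.Set.ofList multiset).length
  ((Nat.factorial multiset.length / 2 ^ repeats : Nat) : Int)

-- The loop over set(positives) only accumulates a sum, so the result does not depend on
-- Python's set iteration order; tail.remove(head) never raises since head ∈ positives,
-- hence it is List.erase (PySem.List.remove?_eq_some_erase).
def possible_integers (positives : List Int) (negatives : List Int) : Int :=
  let count := (PySem.Set.ofList positives).foldl
    (fun count head =>
      if head == 0 then count
      else count + orderings (positives.erase head)) 0
  count * orderings negatives

-- ===== PORT B =====
def possible_integers_alt (positives : List Int) (negatives : List Int) : Int :=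
  let n := positives.length
  let heads := PySem.Set.ofList positives
  let distinct := heads.length
  let singles := (heads.filter (fun d => d != 0 && positives.count d == 1)).length
  let multis : Int := (distinct : Int) - (if (0 : Int) ∈ heads then 1 else 0) - (singles : Int)
  let count : Int :=
    (if multis ≠ 0 then multis * ((Nat.factorial (n - 1) >>> (n - 1 - distinct) : Nat) : Int) else 0)
      + (if (singles : Int) ≠ 0 then (singles : Int) * ((Nat.factorial (n - 1) >>> (n - distinct) : Nat) : Int) else 0)
  let m := negatives.length
  count * ((Nat.factorial m >>> (m - (PySem.Set.ofList negatives).length) : Nat) : Int)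

-- ===== PRECONDITION & SPEC =====
def Spec_possible_integers (positives : List Int) (negatives : List Int) (out : Int) : Prop := out = possible_integers_alt positives negatives
instance (positives : List Int) (negatives : List Int) (out : Int) : Decidable (Spec_possible_integers positives negatives out) := by unfold Spec_possible_integers; infer_instance

-- ===== CLAIM (what is proved, stated in full; the proofs are below) =====
def Claim_equal_possible_integers : Prop := ∀ (positives : List Int) (negatives : List Int), Dom_possible_integers positives negatives → Spec_possible_integers positives negatives (possible_integers positives negatives)

-- ===== LEMMAS AND PROOFS =====

-- sum of a map whose values are classified by a Boolean predicate
theorem sum_map_classify {α : Type} (L : List α) (g : α → Int) (q : α → Bool) (t u : Int)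
    (h : ∀ x ∈ L, g x = if q x then t else u) :
    (L.map g).sum = t * (L.countP q : Int) + u * (L.countP (fun x => !q x) : Int) := by
  induction L with
  | nil => simp
  | cons a L ih =>
    have ha := h a (by simp)
    have ih' := ih (fun x hx => h x (by simp [hx]))
    simp only [List.map_cons, List.sum_cons, List.countP_cons, ih', ha]
    cases hq : q a <;> simp [hq] <;> push_cast <;> ring

theorem length_ofList_eq_card (xs : List Int) :
    (PySem.Set.ofList xs).length = xs.toFinset.card := by
  have hn : (PySem.Set.ofList xs).Nodup := PySem.Set.nodup_ofList xs
  have : (PySem.Set.ofList xs).toFinset = xs.toFinset := by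
    ext a; simp [PySem.Set.mem_ofList]
  rw [← List.toFinset_card_of_nodup hn, this]

theorem toFinset_erase_card (l : List Int) (x : Int) (hx : x ∈ l) :
    (l.erase x).toFinset.card =
      if l.count x = 1 then l.toFinset.card - 1 else l.toFinset.card := by
  by_cases hc : l.count x = 1
  · have hfin : (l.erase x).toFinset = l.toFinset.erase x := by
      ext a
      simp only [List.mem_toFinset, Finset.mem_erase]
      by_cases hax : a = x
      · subst hax
        constructor
        · intro hmem
          have hpos := List.count_pos_iff.mpr hmem
          rw [List.count_erase_self] at hpos
          omega
        · intro h2; exact absurd rfl h2.1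
      · constructor
        · intro hmem; exact ⟨hax, List.mem_of_mem_erase hmem⟩
        · intro h2; exact List.mem_erase_of_ne hax |>.mpr h2.2
    rw [if_pos hc, hfin, Finset.card_erase_of_mem (List.mem_toFinset.mpr hx)]
  · have hfin : (l.erase x).toFinset = l.toFinset := by
      ext a
      simp only [List.mem_toFinset]
      by_cases hax : a = x
      · subst hax
        have h1 : 1 ≤ l.count a := List.count_pos_iff.mpr hx
        constructor
        · intro hmem; exact hx
        · intro _
          apply List.count_pos_iff.mp
          rw [List.count_erase_self]; omega
      · constructor
        · intro hmem; exact List.mem_of_mem_erase hmem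
        · intro h2; exact List.mem_erase_of_ne hax |>.mpr h2
    rw [if_neg hc, hfin]

-- per-head value of A's orderings(tail)
theorem ord_erase (l : List Int) (x : Int) (hx : x ∈ l) :
    orderings (l.erase x) =
      if l.count x = 1
      then ((Nat.factorial (l.length - 1) / 2 ^ (l.length - l.toFinset.card) : Nat) : Int)
      else ((Nat.factorial (l.length - 1) / 2 ^ (l.length - 1 - l.toFinset.card) : Nat) : Int) := by
  have hlen : (l.erase x).length = l.length - 1 := List.length_erase_of_mem hx
  have hn1 : 0 < l.length := List.length_pos_of_mem hx
  have hD1 : 1 ≤ l.toFinset.card := Finset.card_pos.mpr ⟨x, List.mem_toFinset.mpr hx⟩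
  simp only [orderings]
  rw [length_ofList_eq_card, hlen, toFinset_erase_card l x hx]
  by_cases hc : l.count x = 1
  · rw [if_pos hc, if_pos hc]
    have hexp : l.length - 1 - (l.toFinset.card - 1) = l.length - l.toFinset.card := by omega
    rw [hexp]
  · rw [if_neg hc, if_neg hc]

-- rewrite A's skip-zero loop body into guard-then-add form
theorem fold_body_flip (g : Int → Int) :
    (fun (count : Int) (head : Int) => if head == 0 then count else count + g head)
      = (fun (count : Int) (head : Int) => if ¬ (head = 0) then count + g head else count) := by
  funext c h
  by_cases hh : h = 0 <;> simp [hh]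

-- ===== VERDICT (by name: the statement is the Claim_ definition above) =====
theorem possible_integers_spec : Claim_equal_possible_integers := by
  intro positives negatives _
  unfold Spec_possible_integers
  simp only [possible_integers, possible_integers_alt]
  -- notation
  set n := positives.length with hn
  set S := PySem.Set.ofList positives with hS
  set D := S.length with hD
  have hSnodup : S.Nodup := PySem.Set.nodup_ofList positives
  have hcard : positives.toFinset.card = D := (length_ofList_eq_card positives).symm
  -- A's loop = sum over nonzero heads
  rw [fold_body_flip (fun head => orderings (positives.erase head)),
      PySem.List.foldl_ite_eq_foldl_filter, PySem.List.foldl_add]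
  set L := S.filter (fun x => decide ¬ (x = 0)) with hL
  -- classify the per-head terms
  set t : Int := ((Nat.factorial (n - 1) / 2 ^ (n - D) : Nat) : Int) with ht
  set u : Int := ((Nat.factorial (n - 1) / 2 ^ (n - 1 - D) : Nat) : Int) with hu
  have hclass : ∀ x ∈ L, orderings (positives.erase x)
      = if (positives.count x == 1) then t else u := by
    intro x hxL
    have hxS : x ∈ S := List.mem_of_mem_filter hxL
    have hxp : x ∈ positives := (PySem.Set.mem_ofList positives x).mp hxS
    have := ord_erase positives x hxp
    rw [hcard, ← hn] at this
    rw [this]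
    by_cases hc : positives.count x = 1 <;> simp [hc, ht, hu]
  have hsum := sum_map_classify L (fun x => orderings (positives.erase x))
      (fun x => positives.count x == 1) t u hclass
  have hsum2 : (L.map (fun x => orderings (positives.erase x))).sum
      = t * (L.countP (fun x => positives.count x == 1) : Int)
        + u * (L.countP (fun x => !(positives.count x == 1)) : Int) := hsum
  rw [hsum2]
  -- identify the counters with B's singles / multis
  have hq1 : L.countP (fun x => positives.count x == 1)
      = S.countP (fun d => d != 0 && positives.count d == 1) := by
    rw [hL, List.countP_filter]
    apply List.countP_congr
    intro x _
    by_cases hx0 : x = 0 <;> by_cases hc : positives.count x = 1 <;> simp [hx0, hc]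
  have hsingles : (S.filter (fun d => d != 0 && positives.count d == 1)).length
      = S.countP (fun d => d != 0 && positives.count d == 1) :=
    (List.countP_eq_length_filter).symm
  have hq2 : L.countP (fun x => !(positives.count x == 1))
      = S.countP (fun d => d != 0 && !(positives.count d == 1)) := by
    rw [hL, List.countP_filter]
    apply List.countP_congr
    intro x _
    by_cases hx0 : x = 0 <;> by_cases hc : positives.count x = 1 <;> simp [hx0, hc]
  set s := S.countP (fun d => d != 0 && positives.count d == 1) with hs
  set m2 := S.countP (fun d => d != 0 && !(positives.count d == 1)) with hm2
  rw [hq1, hq2, hsingles]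
  -- the zero flag is S.count 0
  have hz : (if (0 : Int) ∈ S then (1 : Int) else 0) = (S.count 0 : Int) := by
    by_cases h0 : (0 : Int) ∈ S
    · rw [if_pos h0, List.count_eq_one_of_mem hSnodup h0]; norm_num
    · rw [if_neg h0, List.count_eq_zero_of_not_mem h0]; simp
  -- D partitions into zero flag + singles + multis
  have hLlen : L.length = S.countP (fun x => decide ¬ (x = 0)) := by
    rw [hL]; exact List.countP_eq_length_filter.symm
  have hpart : D = S.count 0 + (s + m2) := by
    have h1 := List.length_eq_countP_add_countP (l := S) (fun x => x == 0)
    have h1' : S.countP (fun a => decide ¬((a == 0) = true))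
        = S.countP (fun x => decide ¬ (x = 0)) := by
      apply List.countP_congr; intro x _; by_cases hx0 : x = 0 <;> simp [hx0]
    have h2 := List.length_eq_countP_add_countP (l := L)
      (fun x => positives.count x == 1)
    have h2' : L.countP (fun a => decide ¬((positives.count a == 1) = true))
        = L.countP (fun x => !(positives.count x == 1)) := by
      apply List.countP_congr; intro x _
      by_cases hc : positives.count x = 1 <;> simp [hc]
    have hcz : S.countP (fun x => x == 0) = S.count 0 := rfl
    rw [h2', hq2, hq1] at h2
    rw [hcz, h1', ← hLlen, h2] at h1
    exact h1
  have hmultis : (D : Int) - (if (0 : Int) ∈ S then 1 else 0) - (s : Int) = (m2 : Int) := by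
    rw [hz]; push_cast [hpart]; ring
  rw [hmultis]
  -- the two shifted factorials are t and u
  have hTu : ((Nat.factorial (n - 1) >>> (n - 1 - D) : Nat) : Int) = u := by
    rw [hu, Nat.shiftRight_eq_div_pow]
  have hTt : ((Nat.factorial (n - 1) >>> (n - D) : Nat) : Int) = t := by
    rw [ht, Nat.shiftRight_eq_div_pow]
  rw [hTu, hTt]
  -- final arithmetic, case on the guards
  have e1 : (if (m2 : Int) ≠ 0 then (m2 : Int) * u else 0) = (m2 : Int) * u := by
    by_cases hms : (m2 : Int) = 0
    · rw [if_neg (not_not_intro hms), hms, zero_mul]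
    · rw [if_pos hms]
  have e2 : (if (s : Int) ≠ 0 then (s : Int) * t else 0) = (s : Int) * t := by
    by_cases hss : (s : Int) = 0
    · rw [if_neg (not_not_intro hss), hss, zero_mul]
    · rw [if_pos hss]
  have hmain : (0 : Int) + (t * (s : Int) + u * (m2 : Int))
      = (if (m2 : Int) ≠ 0 then (m2 : Int) * u else 0)
        + (if (s : Int) ≠ 0 then (s : Int) * t else 0) := by
    rw [e1, e2]; ring
  rw [hmain]
  -- negatives multiplier
  congr 1
  unfold orderings
  rw [Nat.shiftRight_eq_div_pow]
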